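-- pv_equiv track=rewrite | github.com/budidino/AoC-python | 2020-d14-2.py | part2process
-- ===== SOURCE A (Python) =====
-- import itertools
--
-- def part2process(b):
--   returnArray = []
--   floatingPoints = b.count("X")
--   for product in itertools.product(["0", "1"], repeat=floatingPoints):
--     newB = b
--     for i in range(floatingPoints):
--       newB = newB.replace("X", product[i], 1)
--     returnArray.append(newB)
--   return returnArray
-- ===== SOURCE B (Python) =====
-- def part2process(b):
--   i = b.find("X")
--   if i == -1:
--     return [b]
--   pre, suf = b[:i], b[i+1:]
--   rest = part2process(suf)
--   return [pre + "0" + s for s in rest] + [pre + "1" + s for s in rest]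
-- ===== Notes on version B (the rewrite author's own statement) =====
-- stated objective: simpler
-- what changed: Replaces the itertools.product enumeration with k repeated full-string .replace passes per tuple by a single recursion that splits at the first 'X' and concatenates the 0-branch and 1-branch expansions of the suffix.
import Mathlib
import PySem

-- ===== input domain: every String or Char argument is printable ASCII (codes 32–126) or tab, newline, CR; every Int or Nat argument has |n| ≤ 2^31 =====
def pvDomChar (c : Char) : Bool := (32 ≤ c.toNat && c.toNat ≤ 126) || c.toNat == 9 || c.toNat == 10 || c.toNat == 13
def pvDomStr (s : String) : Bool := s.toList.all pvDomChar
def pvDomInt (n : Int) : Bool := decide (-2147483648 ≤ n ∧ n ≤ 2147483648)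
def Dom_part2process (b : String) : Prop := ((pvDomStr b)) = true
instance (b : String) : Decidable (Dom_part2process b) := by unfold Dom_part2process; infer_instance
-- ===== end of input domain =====

-- B replaces A's itertools.product enumeration (k .replace passes per tuple) by one recursion
-- splitting at the first 'X' and concatenating the 0-branch and 1-branch expansions (simpler).


-- ===== PORT A =====
-- s.replace("X", c, 1): hand port, exact for the one-char needle "X" and one-char replacement
def replaceX : List Char → Char → List Char
  | [], _ => []
  | c :: t, r => if c = 'X' then r :: t else c :: replaceX t r

-- itertools.product(["0","1"], repeat=n), each tuple as a list of chars, exact order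
-- (leftmost coordinate varies slowest)
def products : Nat → List (List Char)
  | 0 => [[]]
  | n + 1 => (products n).map (fun p => '0' :: p) ++ (products n).map (fun p => '1' :: p)

def part2process (b : String) : List String :=
  let l := b.toList
  let floatingPoints := l.count 'X'            -- b.count("X"), exact for a 1-char needle
  ((products floatingPoints).map (fun product => product.foldl replaceX l)).map String.ofList

-- ===== PORT B =====
-- b.find("X") + the slices b[:i], b[i+1:], ported as the split at the first 'X'
-- (takeWhile/dropWhile): exact
def brec (l : List Char) : List (List Char) :=
  let pre := l.takeWhile (fun c => c ≠ 'X')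
  match h : l.dropWhile (fun c => c ≠ 'X') with
  | [] => [l]
  | _ :: suf =>
      (brec suf).map (fun s => pre ++ '0' :: s) ++ (brec suf).map (fun s => pre ++ '1' :: s)
termination_by l.length
decreasing_by
  all_goals
    have hle := List.length_dropWhile_le (fun c => decide (c ≠ 'X')) l
    rw [h] at hle; simp at hle; omega

def part2process_alt (b : String) : List String := (brec b.toList).map String.ofList

-- ===== PRECONDITION & SPEC =====
def Spec_part2process (b : String) (out : List String) : Prop := out = part2process_alt b
instance (b : String) (out : List String) : Decidable (Spec_part2process b out) := by unfold Spec_part2process; infer_instance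

-- ===== CLAIM (what is proved, stated in full; the proofs are below) =====
def Claim_equal_part2process : Prop := ∀ (b : String), Dom_part2process b → Spec_part2process b (part2process b)

-- ===== LEMMAS AND PROOFS =====

theorem brec_nil (l : List Char) (h : l.dropWhile (fun c => decide (c ≠ 'X')) = []) :
    brec l = [l] := by
  rw [brec.eq_def]
  split
  · rfl
  · rename_i d' suf' heq
    rw [h] at heq
    cases heq

theorem brec_cons (l : List Char) (d : Char) (suf : List Char)
    (h : l.dropWhile (fun c => decide (c ≠ 'X')) = d :: suf) :
    brec l = (brec suf).map (fun s => l.takeWhile (fun c => decide (c ≠ 'X')) ++ '0' :: s)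
      ++ (brec suf).map (fun s => l.takeWhile (fun c => decide (c ≠ 'X')) ++ '1' :: s) := by
  rw [brec.eq_def]
  split
  · simp_all
  · rename_i d' suf' heq
    have h2 := h.symm.trans heq
    injection h2 with _ h3
    rw [h3]

theorem dropWhile_cons_head (l : List Char) (d : Char) (suf : List Char)
    (h : l.dropWhile (fun c => decide (c ≠ 'X')) = d :: suf) : d = 'X' := by
  induction l with
  | nil => simp [List.dropWhile] at h
  | cons a t ih =>
      rw [List.dropWhile_cons] at h
      split at h
      · exact ih h
      · rename_i ha
        injection h with h1 _
        rw [← h1]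
        simpa using ha

theorem replaceX_append (a b : List Char) (c : Char) (ha : 'X' ∉ a) :
    replaceX (a ++ b) c = a ++ replaceX b c := by
  induction a with
  | nil => rfl
  | cons x t ih =>
      simp at ha
      have hx : ¬ x = 'X' := fun he => ha.1 he.symm
      simp [replaceX, hx, ih ha.2]

theorem foldl_replaceX_append (p : List Char) (a b : List Char) (ha : 'X' ∉ a) :
    p.foldl replaceX (a ++ b) = a ++ p.foldl replaceX b := by
  induction p generalizing b with
  | nil => rfl
  | cons c t ih => simp [List.foldl, replaceX_append a b c ha, ih]

theorem main_eq (l : List Char) :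
    (products (l.count 'X')).map (fun p => p.foldl replaceX l) = brec l := by
  induction l using brec.induct with
  | case1 l h =>
      have hl : l.takeWhile (fun c => decide (c ≠ 'X')) = l := by
        conv_rhs => rw [← List.takeWhile_append_dropWhile (p := fun c => decide (c ≠ 'X')) (l := l)]
        rw [h, List.append_nil]
      have hc : l.count 'X' = 0 := by
        rw [List.count_eq_zero]
        intro hmem
        have : 'X' ∈ l.takeWhile (fun c => decide (c ≠ 'X')) := by rw [hl]; exact hmem
        simpa using List.mem_takeWhile_imp this
      rw [brec_nil l h, hc]
      simp [products]
  | case2 l d suf heq ih =>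
      have hd : d = 'X' := dropWhile_cons_head l d suf heq
      have hsplit : l = l.takeWhile (fun c => decide (c ≠ 'X')) ++ 'X' :: suf := by
        conv_lhs => rw [← List.takeWhile_append_dropWhile (p := fun c => decide (c ≠ 'X')) (l := l),
          heq]
        rw [hd]
      have hpre : 'X' ∉ l.takeWhile (fun c => decide (c ≠ 'X')) := by
        intro hm
        simpa using List.mem_takeWhile_imp hm
      have hcount : l.count 'X' = suf.count 'X' + 1 := by
        conv_lhs => rw [hsplit]
        rw [List.count_append, List.count_cons, List.count_eq_zero.mpr hpre]
        simp [Nat.add_comm]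
      have step : ∀ c : Char, ¬ c = 'X' →
          ∀ p : List Char, p.foldl replaceX (replaceX l c)
            = l.takeWhile (fun c => decide (c ≠ 'X')) ++ c :: p.foldl replaceX suf := by
        intro c hc p
        have h1 : replaceX l c = l.takeWhile (fun c => decide (c ≠ 'X')) ++ c :: suf := by
          conv_lhs => rw [hsplit]
          rw [replaceX_append _ _ _ hpre]
          simp [replaceX]
        have h2 : 'X' ∉ l.takeWhile (fun c => decide (c ≠ 'X')) ++ [c] := by
          intro hm
          rcases List.mem_append.mp hm with hm | hm
          · exact hpre hm
          · simp at hm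
            exact hc hm.symm
        calc p.foldl replaceX (replaceX l c)
            = p.foldl replaceX ((l.takeWhile (fun c => decide (c ≠ 'X')) ++ [c]) ++ suf) := by
              rw [h1]; simp
          _ = (l.takeWhile (fun c => decide (c ≠ 'X')) ++ [c]) ++ p.foldl replaceX suf :=
              foldl_replaceX_append _ _ _ h2
          _ = l.takeWhile (fun c => decide (c ≠ 'X')) ++ c :: p.foldl replaceX suf := by simp
      rw [brec_cons l d suf heq, hcount, ← ih]
      simp only [products, List.map_append, List.map_map]
      congr 1 <;>
        · apply List.map_congr_left
          intro p _
          simp only [Function.comp_apply, List.foldl_cons]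
          first
            | exact step '0' (by decide) p
            | exact step '1' (by decide) p

-- ===== VERDICT (by name: the statement is the Claim_ definition above) =====
theorem part2process_spec : Claim_equal_part2process := by
  intro b _
  unfold Spec_part2process part2process part2process_alt
  simp only []
  rw [main_eq]
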